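-- pv_equiv track=rewrite | github.com/Clair1234/football-analysis-pipeline | utils/soccerDatasets.py | _find_continuous_segments
-- ===== SOURCE A (Python) =====
-- def _find_continuous_segments(valid_mask): #used
--     """Find continuous segments of valid data"""
--     segments = []
--     start = None
--
--     for i, is_valid in enumerate(valid_mask):
--         if is_valid and start is None:
--             start = i
--         elif not is_valid and start is not None:
--             segments.append((start, i))
--             start = None
--
--     # Handle case where valid segment goes to the end
--     if start is not None:
--         segments.append((start, len(valid_mask)))
--
--     return segments
-- ===== SOURCE B (Python) =====
-- def _find_continuous_segments(valid_mask):
--     """Find continuous segments of valid data (filter-then-group)."""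
--     idx = [i for i, v in enumerate(valid_mask) if v]
--     if not idx:
--         return []
--     segments = []
--     run_start = prev = idx[0]
--     for j in idx[1:]:
--         if j != prev + 1:
--             segments.append((run_start, prev + 1))
--             run_start = j
--         prev = j
--     segments.append((run_start, prev + 1))
--     return segments
-- ===== Notes on version B (the rewrite author's own statement) =====
-- stated objective: alternative
-- what changed: Replaces the single stateful sentinel scan (Optional start carried through one loop) with a two-phase filter-then-group: collect the valid indices first, then group maximal consecutive runs of that index list.
import Mathlib
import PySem

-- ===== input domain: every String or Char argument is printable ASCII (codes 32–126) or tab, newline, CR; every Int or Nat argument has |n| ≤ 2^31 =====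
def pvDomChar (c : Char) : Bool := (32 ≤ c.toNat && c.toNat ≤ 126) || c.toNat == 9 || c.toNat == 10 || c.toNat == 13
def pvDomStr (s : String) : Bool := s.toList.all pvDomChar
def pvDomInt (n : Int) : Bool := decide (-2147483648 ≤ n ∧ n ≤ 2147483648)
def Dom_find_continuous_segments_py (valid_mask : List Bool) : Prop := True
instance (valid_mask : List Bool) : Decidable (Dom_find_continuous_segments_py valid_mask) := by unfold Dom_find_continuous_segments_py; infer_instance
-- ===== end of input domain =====

-- B replaces A's single stateful sentinel scan with a two-phase filter-then-group
-- over the list of valid indices (alternative decomposition, same cost).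


-- ===== PORT A =====
-- A's for-loop, step for step: state is (segments, start); i runs along with the list.
-- It returns the full (segments, start) pair so the post-loop flush can read start.
def fcsLoopA : List Bool → Int → Option Int → List (Int × Int) → List (Int × Int) × Option Int
  | [], _, start, segments => (segments, start)
  | is_valid :: rest, i, start, segments =>
    if is_valid ∧ start = none then
      fcsLoopA rest (i + 1) (some i) segments
    else if ¬ is_valid ∧ start ≠ none then
      fcsLoopA rest (i + 1) none (segments ++ [(start.getD 0, i)])
    else
      fcsLoopA rest (i + 1) start segments

def find_continuous_segments_py (valid_mask : List Bool) : List (Int × Int) :=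
  let st := fcsLoopA valid_mask 0 none []
  match st.2 with
  | some s => st.1 ++ [(s, (valid_mask.length : Int))]
  | none => st.1

-- ===== PORT B =====
-- Source B's grouping loop over idx[1:]: state is (segments-so-far via output, run_start, prev)
def fcsGo : List Int → Int → Int → List (Int × Int)
  | [], run_start, prev => [(run_start, prev + 1)]
  | j :: rest, run_start, prev =>
    if j ≠ prev + 1 then (run_start, prev + 1) :: fcsGo rest j j
    else fcsGo rest run_start j

def find_continuous_segments_py_alt (valid_mask : List Bool) : List (Int × Int) :=
  let idx : List Int := ((PySem.List.enumerate valid_mask 0).filter (·.2)).map (·.1)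
  match idx with
  | [] => []
  | h :: t => fcsGo t h h

-- ===== PRECONDITION & SPEC =====
def Spec_find_continuous_segments_py (valid_mask : List Bool) (out : List (Int × Int)) : Prop := out = find_continuous_segments_py_alt valid_mask
instance (valid_mask : List Bool) (out : List (Int × Int)) : Decidable (Spec_find_continuous_segments_py valid_mask out) := by unfold Spec_find_continuous_segments_py; infer_instance

-- ===== CLAIM (what is proved, stated in full; the proofs are below) =====
def Claim_equal_find_continuous_segments_py : Prop := ∀ (valid_mask : List Bool), Dom_find_continuous_segments_py valid_mask → Spec_find_continuous_segments_py valid_mask (find_continuous_segments_py valid_mask)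

-- ===== LEMMAS AND PROOFS =====

-- valid indices of the mask, starting at offset s (proof-side view of B's idx list)
def fcsIdx : List Bool → Int → List Int
  | [], _ => []
  | v :: rest, s => if v then s :: fcsIdx rest (s + 1) else fcsIdx rest (s + 1)

theorem fcsIdx_eq_filter (m : List Bool) (s : Int) :
    ((PySem.List.enumerate m s).filter (·.2)).map (·.1) = fcsIdx m s := by
  induction m generalizing s with
  | nil => simp [fcsIdx, PySem.List.enumerate_nil]
  | cons v rest ih =>
    simp only [PySem.List.enumerate_cons, List.filter_cons, fcsIdx]
    cases v <;> simp [ih]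

theorem fcsIdx_ge (m : List Bool) (s : Int) : ∀ j ∈ fcsIdx m s, s ≤ j := by
  induction m generalizing s with
  | nil => simp [fcsIdx]
  | cons v rest ih =>
    intro j hj
    cases v <;> simp [fcsIdx] at hj
    · have := ih (s + 1) j hj; omega
    · rcases hj with rfl | hj
      · omega
      · have := ih (s + 1) j hj; omega

-- flushing A's final state equals B's grouping:
-- with start = none it is the grouping of the remaining valid indices;
-- with start = some s (entered just after valid index i-1) it is fcsGo with prev = i - 1
def fcsFlush (m : List Bool) (i : Int) (st : List (Int × Int) × Option Int) : List (Int × Int) :=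
  match st.2 with
  | some s => st.1 ++ [(s, i + (m.length : Int))]
  | none => st.1

theorem fcs_invariant (m : List Bool) :
    (∀ (i : Int) (acc : List (Int × Int)),
        fcsFlush m i (fcsLoopA m i none acc) =
          acc ++ (match fcsIdx m i with | [] => [] | h :: t => fcsGo t h h)) ∧
    (∀ (i s : Int) (acc : List (Int × Int)),
        fcsFlush m i (fcsLoopA m i (some s) acc) =
          acc ++ fcsGo (fcsIdx m i) s (i - 1)) := by
  induction m with
  | nil =>
    refine ⟨fun i acc => by simp [fcsLoopA, fcsFlush, fcsIdx], fun i s acc => ?_⟩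
    simp [fcsLoopA, fcsFlush, fcsIdx, fcsGo]
  | cons v rest ih =>
    obtain ⟨ih1, ih2⟩ := ih
    have hflush : ∀ (i : Int) st, fcsFlush (v :: rest) i st = fcsFlush rest (i + 1) st := by
      intro i st
      cases st.2 <;> simp [fcsFlush, List.length_cons] <;> ring_nf
    constructor
    · intro i acc
      cases v
      · -- invalid, start = none: plain step
        rw [show fcsLoopA (false :: rest) i none acc = fcsLoopA rest (i + 1) none acc by
              simp [fcsLoopA],
            hflush, ih1]
        simp [fcsIdx]
      · -- valid, start = none → some i
        rw [show fcsLoopA (true :: rest) i none acc = fcsLoopA rest (i + 1) (some i) acc by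
              simp [fcsLoopA],
            hflush, ih2]
        simp [fcsIdx, show i + 1 - 1 = i by ring]
    · intro i s acc
      cases v
      · -- invalid, start = some s: append (s, i), start := none
        rw [show fcsLoopA (false :: rest) i (some s) acc
              = fcsLoopA rest (i + 1) none (acc ++ [(s, i)]) by simp [fcsLoopA],
            hflush, ih1]
        -- fcsGo sees a break (every remaining index ≥ i + 1 ≠ (i-1)+1) or the end of idx
        rw [show fcsIdx (false :: rest) i = fcsIdx rest (i + 1) by simp [fcsIdx]]
        cases hfi : fcsIdx rest (i + 1) with
        | nil => simp [fcsGo, show i - 1 + 1 = i by ring]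
        | cons h t =>
          have hge : i + 1 ≤ h := fcsIdx_ge rest (i + 1) h (by simp [hfi])
          rw [show fcsGo (h :: t) s (i - 1) = (s, i - 1 + 1) :: fcsGo t h h by
                simp [fcsGo]; omega]
          simp [show i - 1 + 1 = i by ring]
      · -- valid, start = some s: both states unchanged, prev advances to i
        rw [show fcsLoopA (true :: rest) i (some s) acc
              = fcsLoopA rest (i + 1) (some s) acc by simp [fcsLoopA],
            hflush, ih2]
        rw [show fcsIdx (true :: rest) i = i :: fcsIdx rest (i + 1) by simp [fcsIdx]]
        rw [show fcsGo (i :: fcsIdx rest (i + 1)) s (i - 1)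
              = fcsGo (fcsIdx rest (i + 1)) s i by simp [fcsGo]]
        simp [show i + 1 - 1 = i by ring]

-- ===== VERDICT (by name: the statement is the Claim_ definition above) =====
theorem find_continuous_segments_py_spec : Claim_equal_find_continuous_segments_py := by
  intro valid_mask _
  unfold Spec_find_continuous_segments_py find_continuous_segments_py find_continuous_segments_py_alt
  have h := (fcs_invariant valid_mask).1 0 []
  simp only [fcsFlush, zero_add] at h
  rw [fcsIdx_eq_filter]
  simpa using h
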